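-- pv_equiv track=rewrite | github.com/rwillingeprins/advent_of_code | 2020/day17.py | get_neighbor_coordinates
-- ===== SOURCE A (Python) =====
-- def get_neighbor_coordinates(coordinates):
--     x, *remaining_coordinates = coordinates
--     neighbor_coordinates_list = [(neighbor_x,) for neighbor_x in range(x - 1, x + 2)]
--     while remaining_coordinates:
--         x, *remaining_coordinates = remaining_coordinates
--         neighbor_coordinates_list = [
--             (*neighbor_coordinates, neighbor_x)
--             for neighbor_coordinates in neighbor_coordinates_list
--             for neighbor_x in range(x - 1, x + 2)
--         ]
--     neighbor_coordinates_list.remove(coordinates)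
--     return neighbor_coordinates_list
-- ===== SOURCE B (Python) =====
-- def _tails(coords):
--     if not coords:
--         return [()]
--     c = coords[0]
--     return [(n,) + tail for n in range(c - 1, c + 2) for tail in _tails(coords[1:])]
--
--
-- def get_neighbor_coordinates(coordinates):
--     x, *remaining_coordinates = coordinates
--     result = [(n,) + tail
--               for n in range(x - 1, x + 2)
--               for tail in _tails(remaining_coordinates)]
--     result.remove(coordinates)
--     return result
-- ===== Notes on version B (the rewrite author's own statement) =====
-- stated objective: alternative
-- what changed: Replaced A's d-stage while-loop that rebuilds the full list of partial tuples at each coordinate (extending each on the right) with structural recursion on the coordinates that conses each of the three head choices onto recursively built tails; only the final .remove(coordinates) step is shared.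
import Mathlib
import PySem

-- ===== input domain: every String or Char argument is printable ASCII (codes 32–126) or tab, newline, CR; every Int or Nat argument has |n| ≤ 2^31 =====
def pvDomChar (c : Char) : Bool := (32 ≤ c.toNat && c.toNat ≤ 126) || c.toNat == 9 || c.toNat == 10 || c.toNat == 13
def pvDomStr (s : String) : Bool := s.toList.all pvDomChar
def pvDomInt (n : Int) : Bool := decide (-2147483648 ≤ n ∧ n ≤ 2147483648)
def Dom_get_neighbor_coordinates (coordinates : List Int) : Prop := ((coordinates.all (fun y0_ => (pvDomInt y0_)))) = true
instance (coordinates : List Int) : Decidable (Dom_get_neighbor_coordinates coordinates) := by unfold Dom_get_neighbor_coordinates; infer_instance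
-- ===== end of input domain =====

-- B replaces A's d-stage left fold (which rebuilds the whole list of partial tuples at each
-- coordinate, extending on the right) with structural recursion on the coordinates, consing each
-- head choice onto recursively built tails; objective: alternative decomposition, same cost.

-- ===== PORT A =====
-- Port of A. The `while remaining_coordinates:` loop consuming the list head-first is a foldl over
-- the remaining coordinates. `.remove` is PySem.List.remove?; under Pre_ (nonempty input) the
-- centre tuple is always in the product, so the `none` (ValueError) branch is unreachable.
def get_neighbor_coordinates (coordinates : List Int) : List (List Int) :=
  match coordinates with
  | [] => []  -- Python raises ValueError at unpacking; excluded by Pre_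
  | x :: remaining =>
    let init : List (List Int) :=
      (PySem.List.pyRange (x - 1) (x + 2) 1).map (fun nx => [nx])
    let full : List (List Int) :=
      remaining.foldl
        (fun acc c =>
          acc.flatMap (fun nc => (PySem.List.pyRange (c - 1) (c + 2) 1).map (fun nx => nc ++ [nx])))
        init
    match PySem.List.remove? full coordinates with
    | some l => l
    | none => []  -- unreachable under Pre_

-- ===== PORT B =====
-- Port of Source B's `_tails`: recursion on the list, prepending each of the 3 head choices.
def pvTails (coords : List Int) : List (List Int) :=
  match coords with
  | [] => [[]]
  | c :: rest =>
    (PySem.List.pyRange (c - 1) (c + 2) 1).flatMap (fun n => (pvTails rest).map (fun t => n :: t))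

def get_neighbor_coordinates_alt (coordinates : List Int) : List (List Int) :=
  match coordinates with
  | [] => []  -- Python raises ValueError at unpacking; excluded by Pre_
  | x :: remaining =>
    let result : List (List Int) :=
      (PySem.List.pyRange (x - 1) (x + 2) 1).flatMap
        (fun n => (pvTails remaining).map (fun t => n :: t))
    match PySem.List.remove? result coordinates with
    | some l => l
    | none => []  -- unreachable under Pre_

-- ===== PRECONDITION & SPEC =====
-- Python A raises ValueError ("not enough values to unpack") on the empty tuple; B raises the same.
def Pre_get_neighbor_coordinates (coordinates : List Int) : Prop := coordinates ≠ []
instance (coordinates : List Int) : Decidable (Pre_get_neighbor_coordinates coordinates) := by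
  unfold Pre_get_neighbor_coordinates; infer_instance
def pvWitness_get_neighbor_coordinates : List Int := [1, -2]

def Spec_get_neighbor_coordinates (coordinates : List Int) (out : List (List Int)) : Prop := out = get_neighbor_coordinates_alt coordinates
instance (coordinates : List Int) (out : List (List Int)) : Decidable (Spec_get_neighbor_coordinates coordinates out) := by unfold Spec_get_neighbor_coordinates; infer_instance

-- ===== CLAIM (what is proved, stated in full; the proofs are below) =====
def Claim_equal_get_neighbor_coordinates : Prop := ∀ (coordinates : List Int), Dom_get_neighbor_coordinates coordinates → Pre_get_neighbor_coordinates coordinates → Spec_get_neighbor_coordinates coordinates (get_neighbor_coordinates coordinates)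

-- ===== LEMMAS AND PROOFS =====

-- A's fold over the remaining coordinates, started from any list of partial tuples, appends
-- every tail of B's recursion to every partial tuple.
theorem pv_foldl_eq_tails (rest : List Int) (P : List (List Int)) :
    rest.foldl
      (fun acc c =>
        acc.flatMap (fun nc => (PySem.List.pyRange (c - 1) (c + 2) 1).map (fun nx => nc ++ [nx])))
      P
    = P.flatMap (fun p => (pvTails rest).map (fun t => p ++ t)) := by
  induction rest generalizing P with
  | nil => simp [pvTails]
  | cons c rs ih =>
    simp only [List.foldl_cons, ih, pvTails, List.flatMap_map, List.map_flatMap,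
      List.flatMap_assoc]
    congr 1
    funext p
    simp [Function.comp_def, List.append_assoc]

theorem get_neighbor_coordinates_spec : Claim_equal_get_neighbor_coordinates := by
  intro coordinates _ hpre
  unfold Spec_get_neighbor_coordinates
  match coordinates with
  | [] => exact absurd rfl hpre
  | x :: remaining =>
    unfold get_neighbor_coordinates get_neighbor_coordinates_alt
    simp only [pv_foldl_eq_tails, List.flatMap_map, List.singleton_append]
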